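-- pv_equiv track=rewrite | github.com/EricPWilliamson/Codewars-algorithms | Solutions/immortal_cw.py | cell_by_cell
-- ===== SOURCE A (Python) =====
-- def cell_by_cell(bc, n_rows, n_cols, l, t):
--     #Looks at an incomplete [bc] and tallies up individual cells.
--     d = 2**bc
--     n_rows = min([d, n_rows])
--     n_cols = min([d, n_cols])
--     ex_sum = 0
--     #Go through each cell in our range:
--     for r in range(n_rows):
--         for c in range(n_cols):
--             real_c = c + d
--             #Calc xor and subtract loss
--             xorval = (r^real_c)-l
--             if xorval>0:
--                 ex_sum += xorval
--     return ex_sum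
-- ===== SOURCE B (Python) =====
-- def _tri(x):
--     # sum of max(0, u) for u <= x
--     return 0 if x <= 0 else x * (x + 1) // 2
--
--
-- def _g(a, n):
--     # sum of max(0, v + a) for v in range(n), n >= 0
--     return _tri(n + a - 1) - _tri(a - 1)
--
--
-- def cell_by_cell(bc, n_rows, n_cols, l, t):
--     # Closed-form divide-and-conquer on the top bit: O(bc) instead of scanning every cell.
--     d = 1 << bc
--     R = min(d, n_rows)
--     C = min(d, n_cols)
--     # invariant: answer = acc + sum over r<R, c<C (R,C <= 2^k) of max(0, (r^c) + off)
--     k, off, acc = bc, d - l, 0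
--     while True:
--         if R <= 0 or C <= 0:
--             return acc
--         if k == 0:
--             return acc + max(0, off)
--         h = 1 << (k - 1)
--         if R <= h and C <= h:
--             k -= 1
--         elif R <= h:
--             acc += R * _g(off, h)
--             C -= h
--             off += h
--             k -= 1
--         elif C <= h:
--             acc += C * _g(off, h)
--             R -= h
--             off += h
--             k -= 1
--         else:
--             acc += h * _g(off, h) + (R - h + C - h) * _g(off + h, h)
--             R -= h
--             C -= h
--             k -= 1
-- ===== Notes on version B (the rewrite author's own statement) =====
-- stated objective: faster
-- what changed: Replaces the cell-by-cell double loop with a top-bit divide-and-conquer: at each bit level the full sub-blocks collapse to closed-form triangular-number sums and only the single partial quadrant is recursed on, giving O(bc) arithmetic steps.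
-- outside the precondition, e.g. on cell_by_cell(-1, 0, 3, 0, 0): A returns 0, B raises ValueError
import Mathlib
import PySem

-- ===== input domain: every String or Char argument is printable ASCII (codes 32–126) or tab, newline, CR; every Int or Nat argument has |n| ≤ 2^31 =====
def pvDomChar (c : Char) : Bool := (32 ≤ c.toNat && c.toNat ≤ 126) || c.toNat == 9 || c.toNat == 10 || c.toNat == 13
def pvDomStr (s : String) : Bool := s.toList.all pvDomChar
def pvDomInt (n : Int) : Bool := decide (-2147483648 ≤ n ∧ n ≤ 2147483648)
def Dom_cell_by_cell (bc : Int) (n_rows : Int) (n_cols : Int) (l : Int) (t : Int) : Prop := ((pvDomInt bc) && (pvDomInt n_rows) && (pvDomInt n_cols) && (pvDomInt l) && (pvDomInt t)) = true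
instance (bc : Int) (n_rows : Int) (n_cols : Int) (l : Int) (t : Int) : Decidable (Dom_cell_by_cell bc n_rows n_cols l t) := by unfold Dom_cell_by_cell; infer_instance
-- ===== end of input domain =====

-- B replaces A's cell-by-cell double loop with a top-bit divide-and-conquer using closed-form
-- triangular sums for full sub-blocks (objective: faster; equivalence is about the return value).

-- ===== PORT A =====
def cell_by_cell (bc : Int) (n_rows : Int) (n_cols : Int) (l : Int) (t : Int) : Int :=
  let d : Int := 2 ^ bc.toNat
  let n_rows := min d n_rows
  let n_cols := min d n_cols
  (PySem.List.pyRange 0 n_rows 1).foldl (fun ex_sum r =>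
    (PySem.List.pyRange 0 n_cols 1).foldl (fun ex_sum c =>
      let real_c := c + d
      let xorval := PySem.Int.bxor r real_c - l
      if xorval > 0 then ex_sum + xorval else ex_sum) ex_sum) 0

-- ===== PORT B =====
def pvTri (x : Int) : Int := if x ≤ 0 then 0 else PySem.Int.floordiv (x * (x + 1)) 2

def pvG (a : Int) (n : Int) : Int := pvTri (n + a - 1) - pvTri (a - 1)

-- the while-loop of Source B: k counts down, acc accumulates the closed-form block sums
def pvLoop : Nat → Int → Int → Int → Int → Int
  | k, R, C, off, acc =>
    if R ≤ 0 ∨ C ≤ 0 then acc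
    else
      match k with
      | 0 => acc + max 0 off
      | Nat.succ k' =>
        let h : Int := (1 : Int) <<< k'
        if R ≤ h ∧ C ≤ h then pvLoop k' R C off acc
        else if R ≤ h then pvLoop k' R (C - h) (off + h) (acc + R * pvG off h)
        else if C ≤ h then pvLoop k' (R - h) C (off + h) (acc + C * pvG off h)
        else pvLoop k' (R - h) (C - h) off
          (acc + h * pvG off h + (R - h + C - h) * pvG (off + h) h)

def cell_by_cell_alt (bc : Int) (n_rows : Int) (n_cols : Int) (l : Int) (t : Int) : Int :=
  let d : Int := (1 : Int) <<< bc.toNat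
  let R := min d n_rows
  let C := min d n_cols
  pvLoop bc.toNat R C (d - l) 0

-- ===== PRECONDITION & SPEC =====
-- Pre_ excludes bc < 0, where Python's 2**bc is a float: A raises TypeError in range() unless
-- n_rows <= 0 (then the loop never runs and A returns 0), while B's 1 << bc raises ValueError
-- on every such input.
def Pre_cell_by_cell (bc : Int) (n_rows : Int) (n_cols : Int) (l : Int) (t : Int) : Prop := 0 ≤ bc
instance (bc : Int) (n_rows : Int) (n_cols : Int) (l : Int) (t : Int) : Decidable (Pre_cell_by_cell bc n_rows n_cols l t) := by unfold Pre_cell_by_cell; infer_instance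

def pvWitness_cell_by_cell : Int × Int × Int × Int × Int := (2, 3, 3, 1, 0)

def Spec_cell_by_cell (bc : Int) (n_rows : Int) (n_cols : Int) (l : Int) (t : Int) (out : Int) : Prop := out = cell_by_cell_alt bc n_rows n_cols l t
instance (bc : Int) (n_rows : Int) (n_cols : Int) (l : Int) (t : Int) (out : Int) : Decidable (Spec_cell_by_cell bc n_rows n_cols l t out) := by unfold Spec_cell_by_cell; infer_instance

-- ===== CLAIM (what is proved, stated in full; the proofs are below) =====
def Claim_equal_cell_by_cell : Prop := ∀ (bc : Int) (n_rows : Int) (n_cols : Int) (l : Int) (t : Int), Dom_cell_by_cell bc n_rows n_cols l t → Pre_cell_by_cell bc n_rows n_cols l t → Spec_cell_by_cell bc n_rows n_cols l t (cell_by_cell bc n_rows n_cols l t)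

-- ===== LEMMAS AND PROOFS =====

-- the mathematical value both programs compute, as a reference point
def pvG' (off : Int) (n : Nat) : Int := ∑ v ∈ Finset.range n, max 0 ((v : Int) + off)

def pvS (R C : Nat) (off : Int) : Int :=
  ∑ r ∈ Finset.range R, ∑ c ∈ Finset.range C, max 0 (((r ^^^ c : Nat) : Int) + off)

-- adding the 2^k bit is XOR for numbers below 2^k
theorem pvXorPow (k a : Nat) (h : a < 2 ^ k) : 2 ^ k ^^^ a = 2 ^ k + a := by
  apply Nat.eq_of_testBit_eq
  intro i
  rcases lt_trichotomy i k with hik | rfl | hik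
  · rw [Nat.testBit_xor, Nat.testBit_two_pow_of_ne (by omega), Nat.testBit_two_pow_add_gt hik]
    simp
  · rw [Nat.testBit_xor, Nat.testBit_two_pow_add_eq, Nat.testBit_two_pow_self,
      Nat.testBit_lt_two_pow h]
    simp
  · have h1 : 2 ^ k + a < 2 ^ i := by
      have h2 : 2 ^ (k + 1) ≤ 2 ^ i := Nat.pow_le_pow_right (by norm_num) (by omega)
      have h3 := Nat.pow_lt_pow_right (a := 2) (by norm_num) hik
      omega
    rw [Nat.testBit_xor, Nat.testBit_two_pow_of_ne (by omega),
      Nat.testBit_lt_two_pow h1, Nat.testBit_lt_two_pow (by omega)]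
    simp

theorem pvXorHigh (k a b : Nat) (ha : a < 2 ^ k) (hb : b < 2 ^ k) :
    a ^^^ (2 ^ k + b) = 2 ^ k + (a ^^^ b) := by
  rw [← pvXorPow k b hb, ← pvXorPow k (a ^^^ b) (Nat.xor_lt_two_pow ha hb)]
  rw [Nat.xor_comm (2 ^ k) b, ← Nat.xor_assoc, Nat.xor_comm (a ^^^ b) (2 ^ k)]

theorem pvXorBoth (k a b : Nat) (ha : a < 2 ^ k) (hb : b < 2 ^ k) :
    (2 ^ k + a) ^^^ (2 ^ k + b) = a ^^^ b := by
  rw [← pvXorPow k a ha, ← pvXorPow k b hb]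
  rw [Nat.xor_assoc, Nat.xor_comm a (2 ^ k ^^^ b), Nat.xor_assoc,
    ← Nat.xor_assoc, Nat.xor_self, Nat.zero_xor, Nat.xor_comm b a]

theorem pvTri_step (x : Int) : pvTri x = pvTri (x - 1) + max 0 x := by
  unfold pvTri
  by_cases hx : x ≤ 0
  · rw [if_pos hx, if_pos (by omega)]
    omega
  · rw [if_neg hx]
    by_cases h1 : x - 1 ≤ 0
    · have : x = 1 := by omega
      subst this
      norm_num [PySem.Int.floordiv]
    · rw [if_neg h1]
      rw [PySem.Int.floordiv_eq_ediv_of_pos (by norm_num),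
        PySem.Int.floordiv_eq_ediv_of_pos (by norm_num)]
      have hmax : max 0 x = x := by omega
      rw [hmax]
      have : x * (x + 1) = (x - 1) * x + x * 2 := by ring
      rw [this, Int.add_mul_ediv_right _ _ (by norm_num)]
      norm_num

theorem pvG_spec (a : Int) (n : Nat) : pvG a (n : Int) = pvG' a n := by
  induction n with
  | zero => simp [pvG, pvG']
  | succ n ih =>
    rw [pvG', Finset.sum_range_succ, ← pvG', ← ih]
    unfold pvG
    push_cast
    rw [show (n : Int) + 1 + a - 1 = ((n : Int) + a - 1) + 1 by ring]
    rw [pvTri_step ((n : Int) + a - 1 + 1)]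
    have : (n : Int) + a - 1 + 1 = (n : Int) + a := by ring
    rw [this]
    ring

-- summing over a full row: r ↦ r ^^^ c permutes range (2^k)
theorem pvRowFull (k c : Nat) (hc : c < 2 ^ k) (off : Int) :
    ∑ r ∈ Finset.range (2 ^ k), max 0 (((r ^^^ c : Nat) : Int) + off) = pvG' off (2 ^ k) := by
  unfold pvG'
  refine Finset.sum_nbij' (fun r => r ^^^ c) (fun v => v ^^^ c) ?_ ?_ ?_ ?_ ?_
  · intro a ha
    simp only [Finset.mem_range] at *
    exact Nat.xor_lt_two_pow ha hc
  · intro a ha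
    simp only [Finset.mem_range] at *
    exact Nat.xor_lt_two_pow ha hc
  · intro a _; exact Nat.xor_xor_cancel_right a c
  · intro a _; exact Nat.xor_xor_cancel_right a c
  · intro a _; rfl

theorem pvS_zero_left (C : Nat) (off : Int) : pvS 0 C off = 0 := by simp [pvS]
theorem pvS_zero_right (R : Nat) (off : Int) : pvS R 0 off = 0 := by simp [pvS]

theorem pvRangeSplit (m n : Nat) (h : m ≤ n) (f : Nat → Int) :
    ∑ i ∈ Finset.range n, f i
      = ∑ i ∈ Finset.range m, f i + ∑ i ∈ Finset.range (n - m), f (m + i) := by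
  rw [show n = m + (n - m) by omega, Finset.sum_range_add]
  simp

theorem pvS_colsplit (k Rn Cn : Nat) (off : Int) (hR : Rn ≤ 2 ^ k) (hC1 : 2 ^ k ≤ Cn)
    (hC2 : Cn ≤ 2 ^ (k + 1)) :
    pvS Rn Cn off = Rn * pvG' off (2 ^ k) + pvS Rn (Cn - 2 ^ k) (off + 2 ^ k) := by
  have hpow : (2 : Nat) ^ (k + 1) = 2 ^ k + 2 ^ k := by ring
  unfold pvS
  have key : ∀ r ∈ Finset.range Rn,
      ∑ c ∈ Finset.range Cn, max 0 (((r ^^^ c : Nat) : Int) + off)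
        = pvG' off (2 ^ k)
          + ∑ c ∈ Finset.range (Cn - 2 ^ k), max 0 (((r ^^^ c : Nat) : Int) + (off + 2 ^ k)) := by
    intro r hr
    rw [Finset.mem_range] at hr
    have hr2 : r < 2 ^ k := lt_of_lt_of_le hr hR
    rw [pvRangeSplit (2 ^ k) Cn hC1]
    congr 1
    · calc ∑ c ∈ Finset.range (2 ^ k), max 0 (((r ^^^ c : Nat) : Int) + off)
          = ∑ c ∈ Finset.range (2 ^ k), max 0 (((c ^^^ r : Nat) : Int) + off) := by
            apply Finset.sum_congr rfl; intro c _; rw [Nat.xor_comm]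
        _ = pvG' off (2 ^ k) := pvRowFull k r hr2 off
    · apply Finset.sum_congr rfl
      intro c hc
      rw [Finset.mem_range] at hc
      have hc2 : c < 2 ^ k := by omega
      rw [pvXorHigh k r c hr2 hc2]
      congr 1
      push_cast
      ring
  rw [Finset.sum_congr rfl key, Finset.sum_add_distrib, Finset.sum_const, Finset.card_range,
    nsmul_eq_mul]

theorem pvS_rowsplit (k Rn Cn : Nat) (off : Int) (hR1 : 2 ^ k ≤ Rn) (hR2 : Rn ≤ 2 ^ (k + 1))
    (hC : Cn ≤ 2 ^ k) :
    pvS Rn Cn off = Cn * pvG' off (2 ^ k) + pvS (Rn - 2 ^ k) Cn (off + 2 ^ k) := by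
  have hpow : (2 : Nat) ^ (k + 1) = 2 ^ k + 2 ^ k := by ring
  unfold pvS
  rw [pvRangeSplit (2 ^ k) Rn hR1]
  congr 1
  · rw [Finset.sum_comm]
    have key : ∀ c ∈ Finset.range Cn,
        ∑ r ∈ Finset.range (2 ^ k), max 0 (((r ^^^ c : Nat) : Int) + off) = pvG' off (2 ^ k) := by
      intro c hc
      rw [Finset.mem_range] at hc
      exact pvRowFull k c (lt_of_lt_of_le hc hC) off
    rw [Finset.sum_congr rfl key, Finset.sum_const, Finset.card_range, nsmul_eq_mul]
  · apply Finset.sum_congr rfl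
    intro r hr
    rw [Finset.mem_range] at hr
    have hr2 : r < 2 ^ k := by omega
    apply Finset.sum_congr rfl
    intro c hc
    rw [Finset.mem_range] at hc
    have hc2 : c < 2 ^ k := lt_of_lt_of_le hc hC
    rw [Nat.xor_comm (2 ^ k + r) c, pvXorHigh k c r hc2 hr2, Nat.xor_comm c r]
    congr 1
    push_cast
    ring

theorem pvS_bothsplit (k Rn Cn : Nat) (off : Int) (hR1 : 2 ^ k ≤ Rn) (hR2 : Rn ≤ 2 ^ (k + 1))
    (hC1 : 2 ^ k ≤ Cn) (hC2 : Cn ≤ 2 ^ (k + 1)) :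
    pvS Rn Cn off = 2 ^ k * pvG' off (2 ^ k)
      + ((Rn - 2 ^ k : Nat) + (Cn - 2 ^ k : Nat)) * pvG' (off + 2 ^ k) (2 ^ k)
      + pvS (Rn - 2 ^ k) (Cn - 2 ^ k) off := by
  have hpow : (2 : Nat) ^ (k + 1) = 2 ^ k + 2 ^ k := by ring
  unfold pvS
  rw [pvRangeSplit (2 ^ k) Rn hR1]
  have low : ∀ r ∈ Finset.range (2 ^ k),
      ∑ c ∈ Finset.range Cn, max 0 (((r ^^^ c : Nat) : Int) + off)
        = pvG' off (2 ^ k)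
          + ∑ c ∈ Finset.range (Cn - 2 ^ k), max 0 (((r ^^^ c : Nat) : Int) + (off + 2 ^ k)) := by
    intro r hr
    rw [Finset.mem_range] at hr
    rw [pvRangeSplit (2 ^ k) Cn hC1]
    congr 1
    · calc ∑ c ∈ Finset.range (2 ^ k), max 0 (((r ^^^ c : Nat) : Int) + off)
          = ∑ c ∈ Finset.range (2 ^ k), max 0 (((c ^^^ r : Nat) : Int) + off) := by
            apply Finset.sum_congr rfl; intro c _; rw [Nat.xor_comm]
        _ = pvG' off (2 ^ k) := pvRowFull k r hr off
    · apply Finset.sum_congr rfl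
      intro c hc
      rw [Finset.mem_range] at hc
      have hc2 : c < 2 ^ k := by omega
      rw [pvXorHigh k r c hr hc2]
      congr 1
      push_cast
      ring
  have high : ∀ r ∈ Finset.range (Rn - 2 ^ k),
      ∑ c ∈ Finset.range Cn, max 0 ((((2 ^ k + r) ^^^ c : Nat) : Int) + off)
        = pvG' (off + 2 ^ k) (2 ^ k)
          + ∑ c ∈ Finset.range (Cn - 2 ^ k), max 0 (((r ^^^ c : Nat) : Int) + off) := by
    intro r hr
    rw [Finset.mem_range] at hr
    have hr2 : r < 2 ^ k := by omega
    rw [pvRangeSplit (2 ^ k) Cn hC1]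
    congr 1
    · calc ∑ c ∈ Finset.range (2 ^ k), max 0 ((((2 ^ k + r) ^^^ c : Nat) : Int) + off)
          = ∑ c ∈ Finset.range (2 ^ k), max 0 (((c ^^^ r : Nat) : Int) + (off + 2 ^ k)) := by
            apply Finset.sum_congr rfl; intro c hc
            rw [Finset.mem_range] at hc
            rw [Nat.xor_comm (2 ^ k + r) c, pvXorHigh k c r hc hr2]
            congr 1
            push_cast
            ring
        _ = pvG' (off + 2 ^ k) (2 ^ k) := pvRowFull k r hr2 (off + 2 ^ k)
    · apply Finset.sum_congr rfl
      intro c hc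
      rw [Finset.mem_range] at hc
      have hc2 : c < 2 ^ k := by omega
      rw [pvXorBoth k r c hr2 hc2]
  rw [Finset.sum_congr rfl low, Finset.sum_congr rfl high, Finset.sum_add_distrib,
    Finset.sum_add_distrib, Finset.sum_const, Finset.sum_const, Finset.card_range,
    Finset.card_range, nsmul_eq_mul, nsmul_eq_mul]
  have mid : ∑ r ∈ Finset.range (2 ^ k), ∑ c ∈ Finset.range (Cn - 2 ^ k),
      max 0 (((r ^^^ c : Nat) : Int) + (off + 2 ^ k))
      = ((Cn - 2 ^ k : Nat) : Int) * pvG' (off + 2 ^ k) (2 ^ k) := by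
    rw [Finset.sum_comm]
    have key : ∀ c ∈ Finset.range (Cn - 2 ^ k),
        ∑ r ∈ Finset.range (2 ^ k), max 0 (((r ^^^ c : Nat) : Int) + (off + 2 ^ k))
          = pvG' (off + 2 ^ k) (2 ^ k) := by
      intro c hc
      rw [Finset.mem_range] at hc
      have hc2 : c < 2 ^ k := by omega
      exact pvRowFull k c hc2 (off + 2 ^ k)
    rw [Finset.sum_congr rfl key, Finset.sum_const, Finset.card_range, nsmul_eq_mul]
  rw [mid]
  push_cast
  ring

theorem pvOneShift (k : Nat) : ((1 : Int) <<< k) = ((2 ^ k : Nat) : Int) := by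
  simp [Int.shiftLeft_eq]

theorem pvLoop_spec (k : Nat) (R C off acc : Int) (hR : R ≤ ((2 ^ k : Nat) : Int))
    (hC : C ≤ ((2 ^ k : Nat) : Int)) :
    pvLoop k R C off acc = acc + pvS R.toNat C.toNat off := by
  induction k generalizing R C off acc with
  | zero =>
    rw [pvLoop]
    by_cases h0 : R ≤ 0 ∨ C ≤ 0
    · rw [if_pos h0]
      have hz : R.toNat = 0 ∨ C.toNat = 0 := by omega
      rcases hz with h | h <;> simp [h, pvS_zero_left, pvS_zero_right]
    · rw [if_neg h0]
      have hR1 : R.toNat = 1 := by simp at hR; omega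
      have hC1 : C.toNat = 1 := by simp at hC; omega
      rw [hR1, hC1]
      simp [pvS]
  | succ k' ih =>
    have hp : (2 : Nat) ^ (k' + 1) = 2 ^ k' + 2 ^ k' := by ring
    rw [pvLoop]
    by_cases h0 : R ≤ 0 ∨ C ≤ 0
    · rw [if_pos h0]
      have hz : R.toNat = 0 ∨ C.toNat = 0 := by omega
      rcases hz with h | h <;> simp [h, pvS_zero_left, pvS_zero_right]
    · rw [if_neg h0]
      simp only [pvOneShift k']
      rw [hp] at hR hC
      have ec : ((2 ^ k' : Nat) : Int) = (2 : Int) ^ k' := by push_cast; ring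
      by_cases hRh : R ≤ ((2 ^ k' : Nat) : Int) <;> by_cases hCh : C ≤ ((2 ^ k' : Nat) : Int)
      · rw [if_pos ⟨hRh, hCh⟩]
        exact ih R C off acc hRh hCh
      · rw [if_neg (by tauto), if_pos hRh]
        rw [ih _ _ _ _ hRh (by omega)]
        rw [pvG_spec off (2 ^ k')]
        have e1 : (C - ((2 ^ k' : Nat) : Int)).toNat = C.toNat - 2 ^ k' := by omega
        have e3 : ((R.toNat : Nat) : Int) = R := by omega
        rw [pvS_colsplit k' R.toNat C.toNat off (by omega) (by omega) (by omega), e1, e3, ec]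
        ring
      · rw [if_neg (by tauto), if_neg (by omega), if_pos hCh]
        rw [ih _ _ _ _ (by omega) hCh]
        rw [pvG_spec off (2 ^ k')]
        have e1 : (R - ((2 ^ k' : Nat) : Int)).toNat = R.toNat - 2 ^ k' := by omega
        have e3 : ((C.toNat : Nat) : Int) = C := by omega
        rw [pvS_rowsplit k' R.toNat C.toNat off (by omega) (by omega) (by omega), e1, e3, ec]
        ring
      · rw [if_neg (by tauto), if_neg (by omega), if_neg (by omega)]
        rw [ih _ _ _ _ (by omega) (by omega)]
        rw [pvG_spec off (2 ^ k'), pvG_spec (off + ((2 ^ k' : Nat) : Int)) (2 ^ k')]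
        have e1 : (R - ((2 ^ k' : Nat) : Int)).toNat = R.toNat - 2 ^ k' := by omega
        have e2 : (C - ((2 ^ k' : Nat) : Int)).toNat = C.toNat - 2 ^ k' := by omega
        have e4 : ((R.toNat - 2 ^ k' : Nat) : Int) = R - ((2 ^ k' : Nat) : Int) := by omega
        have e5 : ((C.toNat - 2 ^ k' : Nat) : Int) = C - ((2 ^ k' : Nat) : Int) := by omega
        rw [pvS_bothsplit k' R.toNat C.toNat off (by omega) (by omega) (by omega) (by omega),
          e1, e2, e4, e5, ec]
        ring

theorem pvFoldIf (f : Int → Int) (L : List Int) (init : Int) :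
    L.foldl (fun s x => if f x > 0 then s + f x else s) init
      = init + (L.map (fun x => max 0 (f x))).sum := by
  induction L generalizing init with
  | nil => simp
  | cons x L ih =>
    simp only [List.foldl_cons, List.map_cons, List.sum_cons, ih]
    by_cases h : f x > 0
    · rw [if_pos h]; have : max 0 (f x) = f x := by omega
      rw [this]; ring
    · rw [if_neg h]; have : max 0 (f x) = 0 := by omega
      rw [this]; ring

theorem pvSumMapRange (n : Nat) (f : Nat → Int) :
    ((List.range n).map f).sum = ∑ i ∈ Finset.range n, f i := rfl

theorem portA_eq (bc n_rows n_cols l t : Int) :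
    cell_by_cell bc n_rows n_cols l t
      = pvS (min ((2 ^ bc.toNat : Nat) : Int) n_rows).toNat
            (min ((2 ^ bc.toNat : Nat) : Int) n_cols).toNat
            (((2 ^ bc.toNat : Nat) : Int) - l) := by
  unfold cell_by_cell
  simp only [pvFoldIf, PySem.List.foldl_add, PySem.List.pyRange_one, List.map_map, zero_add,
    sub_zero]
  simp only [pvSumMapRange]
  have hd : (2 : Int) ^ bc.toNat = ((2 ^ bc.toNat : Nat) : Int) := by push_cast; ring
  rw [hd]
  unfold pvS
  apply Finset.sum_congr rfl
  intro r hr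
  apply Finset.sum_congr rfl
  intro c hc
  rw [Finset.mem_range] at hr hc
  have hr2 : r < 2 ^ bc.toNat := lt_of_lt_of_le hr (by omega)
  have hc2 : c < 2 ^ bc.toNat := lt_of_lt_of_le hc (by omega)
  have e1 : (c : Int) + ((2 ^ bc.toNat : Nat) : Int) = ((c + 2 ^ bc.toNat : Nat) : Int) := by
    push_cast; ring
  simp only [Function.comp_apply]
  rw [e1, PySem.Int.bxor_natCast, Nat.add_comm c (2 ^ bc.toNat), pvXorHigh bc.toNat r c hr2 hc2]
  push_cast
  ring_nf

theorem portB_eq (bc n_rows n_cols l t : Int) :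
    cell_by_cell_alt bc n_rows n_cols l t
      = pvS (min ((2 ^ bc.toNat : Nat) : Int) n_rows).toNat
            (min ((2 ^ bc.toNat : Nat) : Int) n_cols).toNat
            (((2 ^ bc.toNat : Nat) : Int) - l) := by
  unfold cell_by_cell_alt
  rw [pvOneShift]
  rw [pvLoop_spec bc.toNat _ _ _ _ (min_le_left _ _) (min_le_left _ _)]
  ring

-- ===== VERDICT (by name: the statement is the Claim_ definition above) =====
theorem cell_by_cell_spec : Claim_equal_cell_by_cell := by
  intro bc n_rows n_cols l t _ _
  unfold Spec_cell_by_cell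
  rw [portA_eq, portB_eq]
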